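-- pv_equiv track=rewrite | github.com/Tibblue/LEI | codigo/diretor/bot_lista/bot_lista.py | find_respostas
-- ===== SOURCE A (Python) =====
-- def find_respostas(palavras,dataset):
--     listaRespostas = []
--     comp = 1
--     n_matches = 0
--     for l in dataset:
--         count = 0
--         for pal in palavras:
--             if(my_substring(pal,l)):
--                 count += 1
--         if count > comp:
--             comp = count
--             listaRespostas = []
--             listaRespostas.append(l.capitalize())
--         elif count == comp:
--             listaRespostas.append(l.capitalize())
--     n_matches = comp
--
--     return listaRespostas,n_matches
--
-- def my_substring (pal,l):
--     l = l.lower()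
--     l = l.split()
--     for p in l:
--         if(pal == p):
--             return True
--     return False
-- ===== SOURCE B (Python) =====
-- def find_respostas(palavras, dataset):
--     counts = [sum(1 for pal in palavras if my_substring(pal, l)) for l in dataset]
--     comp = max([1] + counts)
--     listaRespostas = [l.capitalize() for l, c in zip(dataset, counts) if c == comp]
--     return listaRespostas, comp
--
-- def my_substring(pal, l):
--     l = l.lower()
--     l = l.split()
--     for p in l:
--         if pal == p:
--             return True
--     return False
-- ===== Notes on version B (the rewrite author's own statement) =====
-- stated objective: simpler
-- what changed: Replaces A's stateful best-so-far loop (reset-or-append on the running maximum) by a two-phase decomposition: compute all match counts, take comp = max([1]+counts), then filter once with a comprehension.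
import Mathlib
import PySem

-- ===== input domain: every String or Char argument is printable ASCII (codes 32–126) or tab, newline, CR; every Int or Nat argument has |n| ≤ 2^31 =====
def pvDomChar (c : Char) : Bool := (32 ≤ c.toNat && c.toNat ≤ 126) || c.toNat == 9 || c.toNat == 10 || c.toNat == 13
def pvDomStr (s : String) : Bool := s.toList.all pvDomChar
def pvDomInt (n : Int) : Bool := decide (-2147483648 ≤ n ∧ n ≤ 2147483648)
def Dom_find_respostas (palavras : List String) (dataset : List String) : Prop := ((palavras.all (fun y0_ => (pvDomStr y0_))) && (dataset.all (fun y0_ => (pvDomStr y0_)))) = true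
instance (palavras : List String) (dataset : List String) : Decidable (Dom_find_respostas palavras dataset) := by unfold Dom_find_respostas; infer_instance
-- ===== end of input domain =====

-- B replaces A's stateful best-so-far loop by: compute all counts, take comp = max([1]+counts), filter once (simpler decomposition, same cost).


-- ===== PORT A =====
-- s.capitalize(): ported by hand (no PySem primitive); exact on ASCII strings: first char uppercased, the rest lowercased.
def pyCapitalize (s : String) : String :=
  match s.toList with
  | [] => ""
  | c :: cs => String.ofList (PySem.Chars.upperChar c :: cs.map PySem.Chars.lowerChar)

-- literal port of my_substring: lower, split on whitespace, linear scan for an equal word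
def my_substring (pal : String) (l : String) : Bool :=
  let l1 := PySem.Str.lower l
  let ws := PySem.Str.split₀ l1
  ws.any (fun p => pal == p)

def find_respostas (palavras : List String) (dataset : List String) : List String × Int :=
  let st := dataset.foldl (fun (st : List String × Int) l =>
      let count : Int := palavras.foldl (fun c pal => if my_substring pal l then c + 1 else c) 0
      if count > st.2 then ([pyCapitalize l], count)
      else if count = st.2 then (st.1 ++ [pyCapitalize l], st.2)
      else st)
    (([] : List String), (1 : Int))
  (st.1, st.2)

-- ===== PORT B =====
def find_respostas_alt (palavras : List String) (dataset : List String) : List String × Int :=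
  let counts : List Int := dataset.map (fun l => ((palavras.filter (fun pal => my_substring pal l)).length : Int))
  let comp : Int := counts.foldl max 1
  let listaRespostas := (dataset.zip counts).filterMap
    (fun p => if p.2 = comp then some (pyCapitalize p.1) else none)
  (listaRespostas, comp)

-- ===== PRECONDITION & SPEC =====
def Spec_find_respostas (palavras : List String) (dataset : List String) (out : List String × Int) : Prop := out = find_respostas_alt palavras dataset
instance (palavras : List String) (dataset : List String) (out : List String × Int) : Decidable (Spec_find_respostas palavras dataset out) := by unfold Spec_find_respostas; infer_instance

-- ===== CLAIM (what is proved, stated in full; the proofs are below) =====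
def Claim_equal_find_respostas : Prop := ∀ (palavras : List String) (dataset : List String), Dom_find_respostas palavras dataset → Spec_find_respostas palavras dataset (find_respostas palavras dataset)

-- ===== LEMMAS AND PROOFS =====

-- A's counting loop equals the length of B's filter
theorem count_loop_eq (P : String → Bool) (xs : List String) (c : Int) :
    xs.foldl (fun c pal => if P pal then c + 1 else c) c = c + ((xs.filter P).length : Int) := by
  induction xs generalizing c with
  | nil => simp
  | cons x xs ih =>
    by_cases h : P x <;> simp [List.filter_cons, h, ih] <;> push_cast <;> ring

-- every count is bounded by the running foldl max
theorem le_foldl_max (l : List Int) (init : Int) :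
    init ≤ l.foldl max init ∧ ∀ a ∈ l, a ≤ l.foldl max init := by
  induction l generalizing init with
  | nil => simp
  | cons x xs ih =>
    refine ⟨le_trans (le_max_left _ _) (ih (max init x)).1, ?_⟩
    intro a ha
    rcases List.mem_cons.mp ha with rfl | h
    · exact le_trans (le_max_right _ _) (ih (max init a)).1
    · exact (ih (max init x)).2 a h

-- B's zip/filterMap selection as a map of a filter
theorem zip_filterMap_eq (cnt : String → Int) (comp : Int) (ds : List String) :
    ((ds.zip (ds.map cnt)).filterMap (fun p => if p.2 = comp then some (pyCapitalize p.1) else none))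
      = (ds.filter (fun l => cnt l = comp)).map pyCapitalize := by
  induction ds with
  | nil => rfl
  | cons d ds ih =>
    by_cases h : cnt d = comp <;> simp [List.filter_cons, h, ih]

-- invariant of A's loop: its state is B's (selection, maximum) pair
theorem loop_invariant (cnt : String → Int) (ds : List String) :
    ds.foldl (fun (st : List String × Int) l =>
        if cnt l > st.2 then ([pyCapitalize l], cnt l)
        else if cnt l = st.2 then (st.1 ++ [pyCapitalize l], st.2)
        else st) (([] : List String), (1 : Int))
      = ((ds.filter (fun l => cnt l = (ds.map cnt).foldl max 1)).map pyCapitalize,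
         (ds.map cnt).foldl max 1) := by
  induction ds using List.reverseRecOn with
  | nil => rfl
  | append_singleton ds l ih =>
    rw [List.foldl_append, ih, List.map_append, List.foldl_append]
    simp only [List.map_cons, List.map_nil, List.foldl_cons, List.foldl_nil]
    by_cases h1 : cnt l > (ds.map cnt).foldl max 1
    · have hm : max ((ds.map cnt).foldl max 1) (cnt l) = cnt l := by omega
      rw [if_pos h1]
      simp only [hm]
      have hfilter : ds.filter (fun x => cnt x = cnt l) = [] := by
        rw [List.filter_eq_nil_iff]
        intro x hx hcx
        have := (le_foldl_max (ds.map cnt) 1).2 (cnt x) (List.mem_map_of_mem hx)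
        simp at hcx
        omega
      simp [List.filter_append, hfilter, List.filter_cons]
    · by_cases h2 : cnt l = (ds.map cnt).foldl max 1
      · have hm : max ((ds.map cnt).foldl max 1) (cnt l) = (ds.map cnt).foldl max 1 := by omega
        rw [if_neg h1, if_pos h2]
        simp only [hm]
        simp [List.filter_append, List.filter_cons, h2]
      · have hm : max ((ds.map cnt).foldl max 1) (cnt l) = (ds.map cnt).foldl max 1 := by omega
        rw [if_neg h1, if_neg h2]
        simp only [hm]
        simp [List.filter_append, List.filter_cons, h2]

-- ===== VERDICT (by name: the statement is the Claim_ definition above) =====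
theorem find_respostas_spec : Claim_equal_find_respostas := by
  intro palavras dataset _
  unfold Spec_find_respostas find_respostas find_respostas_alt
  have hcnt : ∀ l, palavras.foldl (fun c pal => if my_substring pal l then c + 1 else c) 0
      = ((palavras.filter (fun pal => my_substring pal l)).length : Int) := by
    intro l; rw [count_loop_eq]; ring
  set cnt : String → Int := fun l => ((palavras.filter (fun pal => my_substring pal l)).length : Int) with hcntdef
  have hfun : (fun (st : List String × Int) l =>
      let count : Int := palavras.foldl (fun c pal => if my_substring pal l then c + 1 else c) 0
      if count > st.2 then ([pyCapitalize l], count)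
      else if count = st.2 then (st.1 ++ [pyCapitalize l], st.2)
      else st)
    = (fun (st : List String × Int) l =>
        if cnt l > st.2 then ([pyCapitalize l], cnt l)
        else if cnt l = st.2 then (st.1 ++ [pyCapitalize l], st.2)
        else st) := by
    funext st l
    simp only [hcnt, hcntdef]
  simp only [hfun, loop_invariant cnt dataset, zip_filterMap_eq cnt]
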